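-- pv_equiv track=rewrite | github.com/ujjain127/Meditalks | backend/services/text_summarization_service.py | _fallback_summary
-- ===== SOURCE A (Python) =====
-- def _fallback_summary(text: str) -> str:
--     """Simple fallback summary method"""
--     if not text:
--         return "No content to summarize."
--
--     # Simple approach: take first few sentences
--     sentences = []
--     current_sentence = ""
--
--     for char in text:
--         current_sentence += char
--         if char in '.!?':
--             sentences.append(current_sentence.strip())
--             current_sentence = ""
--             if len(sentences) >= 3:
--                 break
--
--     summary = ' '.join(sentences).strip()
--
--     if len(summary) > 300:
--         summary = summary[:300] + "..."
--
--     return summary or "Content processed successfully."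
-- ===== SOURCE B (Python) =====
-- TERMS = '.!?'
--
--
-- def _first_sentences(k, text):
--     """Up to k terminator-ended sentences from the front of text, recursively."""
--     if k == 0:
--         return []
--     j = 0
--     while j < len(text) and text[j] not in TERMS:
--         j += 1
--     if j == len(text):
--         return []
--     return [text[:j + 1].strip()] + _first_sentences(k - 1, text[j + 1:])
--
--
-- def _fallback_summary(text: str) -> str:
--     """Simple fallback summary method"""
--     if not text:
--         return "No content to summarize."
--
--     summary = ' '.join(_first_sentences(3, text)).strip()
--
--     if len(summary) > 300:
--         summary = summary[:300] + "..."
--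
--     return summary or "Content processed successfully."
-- ===== Notes on version B (the rewrite author's own statement) =====
-- stated objective: alternative
-- what changed: Replaces A's single char-by-char accumulator loop with break-out state by a recursive decomposition: find the next terminator (span), slice off one stripped sentence, recurse with the budget decremented.
import Mathlib
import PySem

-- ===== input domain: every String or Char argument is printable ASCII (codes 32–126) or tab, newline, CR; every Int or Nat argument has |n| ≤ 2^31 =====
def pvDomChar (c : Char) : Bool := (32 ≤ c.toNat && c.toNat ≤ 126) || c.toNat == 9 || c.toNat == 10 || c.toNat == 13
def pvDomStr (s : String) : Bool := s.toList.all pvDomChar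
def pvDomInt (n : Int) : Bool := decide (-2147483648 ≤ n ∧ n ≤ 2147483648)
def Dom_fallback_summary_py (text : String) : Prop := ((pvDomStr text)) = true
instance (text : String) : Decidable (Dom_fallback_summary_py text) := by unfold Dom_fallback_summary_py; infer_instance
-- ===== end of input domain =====

-- B replaces A's char-accumulator loop by a recursive split-off-one-sentence decomposition (alternative, same cost).

-- ===== PORT A =====
-- the for-loop over text's characters, carrying (sentences, current_sentence); early break at 3 sentences
def pvLoopA : List Char → List (List Char) → List Char → List (List Char)
  | [], sents, _cur => sents
  | c :: cs, sents, cur =>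
    let cur' := cur ++ [c]
    if ['.', '!', '?'].contains c then
      let sents' := sents ++ [PySem.Chars.strip cur']
      if sents'.length ≥ 3 then sents'
      else pvLoopA cs sents' []
    else pvLoopA cs sents cur'

def fallback_summary_py (text : String) : String :=
  if text = "" then "No content to summarize."
  else
    let sents := pvLoopA text.toList [] []
    let summary := PySem.Chars.strip (PySem.Chars.join [' '] sents)
    let summary := if summary.length > 300 then PySem.List.slice summary none (some 300) ++ "...".toList else summary
    if summary = [] then "Content processed successfully." else String.ofList summary

-- ===== PORT B =====
def pvIsTerm (c : Char) : Bool := c == '.' || c == '!' || c == '?'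

-- the j-advancing while loop of Source B, as (chars before first terminator, rest from the terminator)
def pvSpanB : List Char → List Char × List Char
  | [] => ([], [])
  | c :: cs => if pvIsTerm c then ([], c :: cs) else
      let p := pvSpanB cs
      (c :: p.1, p.2)

def pvFirstSentences : Nat → List Char → List (List Char)
  | 0, _ => []
  | k + 1, cs =>
    match pvSpanB cs with
    | (_, []) => []
    | (pre, t :: rest) => PySem.Chars.strip (pre ++ [t]) :: pvFirstSentences k rest

def fallback_summary_py_alt (text : String) : String :=
  if text = "" then "No content to summarize."
  else
    let sents := pvFirstSentences 3 text.toList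
    let summary := PySem.Chars.strip (PySem.Chars.join [' '] sents)
    let summary := if summary.length > 300 then PySem.List.slice summary none (some 300) ++ "...".toList else summary
    if summary = [] then "Content processed successfully." else String.ofList summary

-- ===== PRECONDITION & SPEC =====
def Spec_fallback_summary_py (text : String) (out : String) : Prop := out = fallback_summary_py_alt text
instance (text : String) (out : String) : Decidable (Spec_fallback_summary_py text out) := by unfold Spec_fallback_summary_py; infer_instance

-- ===== CLAIM (what is proved, stated in full; the proofs are below) =====
def Claim_equal_fallback_summary_py : Prop := ∀ (text : String), Dom_fallback_summary_py text → Spec_fallback_summary_py text (fallback_summary_py text)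

-- ===== LEMMAS AND PROOFS =====
lemma pvSpanB_cons_term (c : Char) (cs : List Char) (h : pvIsTerm c = true) :
    pvSpanB (c :: cs) = ([], c :: cs) := by simp [pvSpanB, h]

lemma pvSpanB_append (acc cs : List Char) (h : ∀ c ∈ acc, pvIsTerm c = false) :
    pvSpanB (acc ++ cs) = (acc ++ (pvSpanB cs).1, (pvSpanB cs).2) := by
  induction acc with
  | nil => simp
  | cons a as ih =>
    have ha : pvIsTerm a = false := h a (by simp)
    simp [pvSpanB, ha, ih (fun c hc => h c (by simp [hc]))]

lemma pvContains_eq_isTerm (c : Char) : ['.', '!', '?'].contains c = pvIsTerm c := by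
  simp only [List.contains_cons, List.contains_nil, Bool.or_false, pvIsTerm, Bool.or_assoc]

lemma pvFS_nil (k : Nat) (cs pre : List Char) (h : pvSpanB cs = (pre, [])) :
    pvFirstSentences (k + 1) cs = [] := by
  simp only [pvFirstSentences]; rw [h]

lemma pvFS_cons (k : Nat) (cs pre rest : List Char) (t : Char)
    (h : pvSpanB cs = (pre, t :: rest)) :
    pvFirstSentences (k + 1) cs = PySem.Chars.strip (pre ++ [t]) :: pvFirstSentences k rest := by
  simp only [pvFirstSentences]; rw [h]

lemma pvLoopA_eq (cs : List Char) : ∀ (sents : List (List Char)) (acc : List Char),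
    (∀ c ∈ acc, pvIsTerm c = false) → sents.length < 3 →
    pvLoopA cs sents acc = sents ++ pvFirstSentences (3 - sents.length) (acc ++ cs) := by
  induction cs with
  | nil =>
    intro sents acc hacc hlen
    obtain ⟨m, hm⟩ : ∃ m, 3 - sents.length = m + 1 := ⟨2 - sents.length, by omega⟩
    have hspan : pvSpanB acc = (acc, ([] : List Char)) := by
      have := pvSpanB_append acc [] hacc
      simpa [pvSpanB] using this
    rw [hm, List.append_nil, pvFS_nil m acc acc hspan]
    simp [pvLoopA]
  | cons c cs ih =>
    intro sents acc hacc hlen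
    obtain ⟨m, hm⟩ : ∃ m, 3 - sents.length = m + 1 := ⟨2 - sents.length, by omega⟩
    rw [show pvLoopA (c :: cs) sents acc =
        (if ['.', '!', '?'].contains c then
          (if (sents ++ [PySem.Chars.strip (acc ++ [c])]).length ≥ 3
           then sents ++ [PySem.Chars.strip (acc ++ [c])]
           else pvLoopA cs (sents ++ [PySem.Chars.strip (acc ++ [c])]) [])
         else pvLoopA cs sents (acc ++ [c])) from rfl]
    rw [pvContains_eq_isTerm]
    by_cases hc : pvIsTerm c = true
    · have hspan : pvSpanB (acc ++ c :: cs) = (acc, c :: cs) := by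
        rw [pvSpanB_append acc (c :: cs) hacc, pvSpanB_cons_term c cs hc]; simp
      rw [hc, if_pos rfl, hm, pvFS_cons m (acc ++ c :: cs) acc cs c hspan]
      by_cases h3 : (sents ++ [PySem.Chars.strip (acc ++ [c])]).length ≥ 3
      · have hm0 : m = 0 := by simp at h3; omega
        rw [if_pos h3, hm0]
        rfl
      · have hlt : (sents ++ [PySem.Chars.strip (acc ++ [c])]).length < 3 := by omega
        rw [if_neg h3]
        rw [ih (sents ++ [PySem.Chars.strip (acc ++ [c])]) [] (by simp) hlt]
        have hmm : 3 - (sents ++ [PySem.Chars.strip (acc ++ [c])]).length = m := by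
          simp; omega
        rw [hmm]
        simp
    · have hc' : pvIsTerm c = false := by simpa using hc
      rw [hc']
      simp only [Bool.false_eq_true, if_false]
      rw [ih sents (acc ++ [c])
        (by intro x hx; rcases List.mem_append.1 hx with h | h
            · exact hacc x h
            · simp at h; subst h; exact hc') hlen]
      simp

-- ===== VERDICT (by name: the statement is the Claim_ definition above) =====
theorem fallback_summary_py_spec : Claim_equal_fallback_summary_py := by
  intro text _dom
  unfold Spec_fallback_summary_py fallback_summary_py fallback_summary_py_alt
  by_cases h : text = ""
  · simp [h]
  · rw [if_neg h, if_neg h]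
    have := pvLoopA_eq text.toList [] [] (by simp) (by simp)
    simp at this
    rw [this]
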